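-- pv_equiv track=rewrite | github.com/cxyfer/OJ | Leetcode/python3/medium/2311_Longest Binary Subsequence Less Than or Equal to K.py | longestSubsequence
-- ===== SOURCE A (Python) =====
-- def longestSubsequence(s: str, k: int) -> int:
--     n = len(s)
--     ans = n
--     v = 0
--     for i in range(max(n - 30, 0), n):
--         v = (v << 1) + int(s[i] == '1')
--     for i, b in enumerate(s):
--         if b == '1':
--             if (n - i - 1) >= 30:
--                 ans -= 1
--                 continue
--             if v <= k:
--                 break
--             v ^= 1 << (n - i - 1)
--             ans -= 1
--     return ans
-- ===== SOURCE B (Python) =====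
-- def longestSubsequence(s: str, k: int) -> int:
--     # keep every non-'1' character for free, then greedily add '1' bits
--     # from the least-significant end while the value stays <= k
--     free = sum(c != '1' for c in s)
--     val = 0
--     ones = 0
--     for i, c in enumerate(reversed(s)):
--         if c == '1' and val + (1 << i) <= k:
--             val += 1 << i
--             ones += 1
--     return free + ones
-- ===== Notes on version B (the rewrite author's own statement) =====
-- stated objective: simpler
-- what changed: Replaces A's 'start at n, compute the low 30-bit value, strip high-order ones until it fits' greedy (with its hard-coded 30-bit cap and xor bit-clearing) by the direct greedy: count every non-'1' character as free and add '1' bits from the least-significant end while the accumulated value stays <= k.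
-- intended difference: On strings that have a '1' of weight >= 2^30 whose lowest such weight still fits under k on top of the value of the 30 low bits, A's hard-coded 30-bit cap strips that '1' and returns a too-small length (e.g. 30 on ('1'+'0'*30, 2**30)), while B keeps it and returns the intended longer subsequence length (31 there). — e.g. on longestSubsequence("1000000000000000000000000000000", 1073741824): A returns 30, B returns 31
import Mathlib
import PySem

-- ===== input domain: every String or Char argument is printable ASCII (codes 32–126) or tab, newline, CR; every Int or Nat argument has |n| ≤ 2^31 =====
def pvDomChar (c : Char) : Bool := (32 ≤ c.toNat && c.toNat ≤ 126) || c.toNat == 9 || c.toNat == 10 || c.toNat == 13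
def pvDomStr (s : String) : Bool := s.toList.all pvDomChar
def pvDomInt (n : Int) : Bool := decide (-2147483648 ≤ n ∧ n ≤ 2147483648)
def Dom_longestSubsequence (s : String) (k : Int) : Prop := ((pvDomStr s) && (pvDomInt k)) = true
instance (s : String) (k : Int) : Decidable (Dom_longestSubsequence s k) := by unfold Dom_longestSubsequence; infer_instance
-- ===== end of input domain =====

-- B replaces A's "start from the full length and strip high-order ones" greedy by the
-- direct "keep every non-'1' character and add '1's from the least-significant end" greedy
-- (objective: simpler); B has no 30-bit cap, so on the inputs described by D_ below it
-- returns the intended longer length where A's cap makes it strip a '1' that still fits.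

-- ===== PORT A =====
def pvLoopA (k n : Int) : List Char → Int → Int → Int → Int
  | [], _i, ans, _v => ans
  | c :: rest, i, ans, v =>
    if c = '1' then
      if 30 ≤ n - i - 1 then pvLoopA k n rest (i + 1) (ans - 1) v
      else if v ≤ k then ans
      else pvLoopA k n rest (i + 1) (ans - 1)
             -- v ^= 1 << (n-i-1); the shift amount n-i-1 is ≥ 0 inside the loop, so .toNat is exact
             (PySem.Int.bxor v ((1 : Int) <<< (n - i - 1).toNat))
    else pvLoopA k n rest (i + 1) ans v

def longestSubsequence (s : String) (k : Int) : Int :=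
  let l := s.toList
  let n : Int := l.length
  -- for i in range(max(n-30,0), n): v = (v << 1) + int(s[i]=='1')   (index always in range, pyGetD exact)
  let v : Int := (PySem.List.pyRange (max (n - 30) 0) n).foldl
      (fun v i => (v <<< (1 : Nat)) + (if PySem.List.pyGetD l i ' ' = '1' then 1 else 0)) 0
  pvLoopA k n l 0 n v

-- ===== PORT B =====
def pvLoopB (k : Int) : List (Int × Char) → Int → Int → Int
  | [], _val, cnt => cnt
  | (i, c) :: rest, val, cnt =>
    -- enumerate indices are ≥ 0, so the shift amount .toNat is exact
    if c = '1' ∧ val + ((1 : Int) <<< i.toNat) ≤ k then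
      pvLoopB k rest (val + ((1 : Int) <<< i.toNat)) (cnt + 1)
    else pvLoopB k rest val cnt

def longestSubsequence_alt (s : String) (k : Int) : Int :=
  let l := s.toList
  let free : Int := l.foldl (fun a c => a + (if c ≠ '1' then 1 else 0)) 0
  free + pvLoopB k (PySem.List.enumerate l.reverse) 0 0

-- ===== PRECONDITION & SPEC =====
-- On strings with a '1' of weight ≥ 2^30 whose lowest such weight still fits under k on top of
-- the value of the 30 low bits, A's hard-coded 30-bit cap strips that '1' and returns a length
-- that is too small, while B keeps it; B's longer subsequence length is the intended answer.
-- (es = the bit positions of the '1's, counted from the right end; only the last 32 characters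
-- matter, because a '1' of weight ≥ 2^32 can never fit under a k admitted by Dom.)
def D_longestSubsequence (s : String) (k : Int) : Prop :=
  let es := (s.toList.drop (s.toList.length - 32)).reverse.findIdxs (· = '1')
  es.filter (30 ≤ ·) ≠ [] ∧
  ((es.filter (· < 30)).map ((2 : Int) ^ ·)).sum + 2 ^ (es.filter (30 ≤ ·)).headD 0 ≤ k
instance (s : String) (k : Int) : Decidable (D_longestSubsequence s k) := by
  unfold D_longestSubsequence; infer_instance

def Spec_longestSubsequence (s : String) (k : Int) (out : Int) : Prop :=
  ¬ D_longestSubsequence s k → out = longestSubsequence_alt s k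
instance (s : String) (k : Int) (out : Int) : Decidable (Spec_longestSubsequence s k out) := by
  unfold Spec_longestSubsequence; infer_instance

def pvDiffWitness_longestSubsequence : String × Int :=
  ("1000000000000000000000000000000", 1073741824)
def pvDiffWitnessOut_longestSubsequence : Int × Int := (30, 31)

-- ===== CLAIM =====
def Claim_unchanged_longestSubsequence : Prop := ∀ (s : String) (k : Int),
  Dom_longestSubsequence s k → Spec_longestSubsequence s k (longestSubsequence s k)
def Claim_changed_longestSubsequence : Prop :=
  Dom_longestSubsequence (pvDiffWitness_longestSubsequence.1) (pvDiffWitness_longestSubsequence.2) ∧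
  D_longestSubsequence (pvDiffWitness_longestSubsequence.1) (pvDiffWitness_longestSubsequence.2) ∧
  longestSubsequence (pvDiffWitness_longestSubsequence.1) (pvDiffWitness_longestSubsequence.2) = pvDiffWitnessOut_longestSubsequence.1 ∧
  longestSubsequence_alt (pvDiffWitness_longestSubsequence.1) (pvDiffWitness_longestSubsequence.2) = pvDiffWitnessOut_longestSubsequence.2 ∧
  pvDiffWitnessOut_longestSubsequence.1 ≠ pvDiffWitnessOut_longestSubsequence.2
def Claim_exact_longestSubsequence : Prop := ∀ (s : String) (k : Int),
  Dom_longestSubsequence s k → D_longestSubsequence s k →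
  longestSubsequence s k ≠ longestSubsequence_alt s k

-- ===== LEMMAS AND PROOFS =====
def pvLow (r : List Char) : List Char := r.drop (r.length - 30)
-- pvExps r = exponents (= distance from the right end) of the '1's of r, left to right
def pvExps : List Char → List Nat
  | [] => []
  | c :: r => (if c = '1' then [r.length] else []) ++ pvExps r
-- pvSpow ws = sum of the powers 2^w, w ∈ ws
def pvSpow (ws : List Nat) : Int := (ws.map (fun w => (2 : Int) ^ w)).sum
-- the old-style change region, convenient for the proofs; pvD_iff below identifies it with D_
def pvDold (s : String) (k : Int) : Prop :=
  pvExps (s.toList.take (s.toList.length - 30)) ≠ [] ∧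
  pvSpow (pvExps (s.toList.drop (s.toList.length - 30))) +
      2 ^ ((pvExps (s.toList.take (s.toList.length - 30))).getLastD 0 + 30) ≤ k
-- pvVal r = numeric value of r read as binary (any non-'1' counts as 0, as both programs do)
def pvVal (r : List Char) : Int := r.foldl (fun v c => v * 2 + (if c = '1' then 1 else 0)) 0
def pvFA (k : Int) : List Nat → Int → Int
  | [], _ => 0
  | w :: rest, v => if v ≤ k then 1 + rest.length else pvFA k rest (v - 2 ^ w)
def pvMP (k : Int) : List Nat → Int → Int
  | [], _ => 0
  | w :: rest, val => if val + 2 ^ w ≤ k then 1 + pvMP k rest (val + 2 ^ w) else 0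
def pvGB (k : Int) : List Nat → Int → Int
  | [], _ => 0
  | w :: rest, val => if val + 2 ^ w ≤ k then 1 + pvGB k rest (val + 2 ^ w) else pvGB k rest val
def pvEx (o : Nat) : List Char → List Nat
  | [] => []
  | c :: r => (if c = '1' then [o] else []) ++ pvEx (o + 1) r

lemma pvVal_acc (r : List Char) : ∀ a : Int,
    r.foldl (fun v c => v * 2 + (if c = '1' then 1 else 0)) a = a * 2 ^ r.length + pvVal r := by
  induction r with
  | nil => intro a; simp [pvVal]
  | cons c r ih =>
    intro a
    simp only [List.foldl_cons, List.length_cons]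
    rw [ih]
    conv_rhs => rw [pvVal, List.foldl_cons,
      show (0:Int) * 2 + (if c = '1' then 1 else 0) = (if c = '1' then 1 else 0) by ring, ih]
    show _ = _ + ((if c = '1' then (1:Int) else 0) * 2 ^ r.length + pvVal r)
    rw [pow_succ]
    split_ifs <;> ring

lemma pvVal_cons (c : Char) (r : List Char) :
    pvVal (c :: r) = (if c = '1' then 2 ^ r.length else 0) + pvVal r := by
  rw [pvVal, List.foldl_cons, show (0:Int) * 2 + (if c = '1' then 1 else 0) = (if c = '1' then 1 else 0) by ring,
      pvVal_acc]
  split_ifs <;> ring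

lemma pvVal_nonneg (r : List Char) : 0 ≤ pvVal r := by
  induction r with
  | nil => simp [pvVal]
  | cons c r ih => rw [pvVal_cons]; have : (0:Int) ≤ 2 ^ r.length := by positivity
                   split_ifs <;> omega

lemma pvVal_lt (r : List Char) : pvVal r < 2 ^ r.length := by
  induction r with
  | nil => simp [pvVal]
  | cons c r ih =>
    rw [pvVal_cons, List.length_cons, pow_succ]
    have : (0:Int) < 2 ^ r.length := by positivity
    split_ifs <;> omega

lemma pvSpow_nonneg (ws : List Nat) : 0 ≤ pvSpow ws := by
  induction ws with
  | nil => simp [pvSpow]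
  | cons w ws ih =>
    rw [pvSpow, List.map_cons, List.sum_cons]
    have : (0:Int) < 2 ^ w := by positivity
    rw [pvSpow] at ih; omega

lemma pvSpow_cons (w : Nat) (ws : List Nat) : pvSpow (w :: ws) = 2 ^ w + pvSpow ws := by
  simp [pvSpow]

lemma pvSpow_reverse (ws : List Nat) : pvSpow ws.reverse = pvSpow ws := by
  simp [pvSpow, List.map_reverse]

lemma pvVal_eq_spow (r : List Char) : pvVal r = pvSpow (pvExps r) := by
  induction r with
  | nil => simp [pvVal, pvExps, pvSpow]
  | cons c r ih =>
    rw [pvVal_cons, pvExps, ih]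
    split_ifs <;> simp [pvSpow]

lemma pv_xor_step (a : Int) (w : Nat) (h0 : 0 ≤ a) (h1 : a < 2 ^ w) :
    PySem.Int.bxor (2 ^ w + a) ((1 : Int) <<< w) = a := by
  have hs : (1 : Int) <<< w = 2 ^ w := by simp [Int.shiftLeft_eq]
  obtain ⟨m, rfl⟩ := Int.eq_ofNat_of_zero_le h0
  have hm : m < 2 ^ w := by exact_mod_cast h1
  have h2 : ((2:Int) ^ w + m) = ((2 ^ w + m : Nat) : Int) := by push_cast; ring
  have h3 : ((2:Int) ^ w) = ((2 ^ w : Nat) : Int) := by push_cast; ring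
  rw [hs, h2, h3, PySem.Int.bxor_natCast]
  norm_cast
  apply Nat.eq_of_testBit_eq; intro j
  rw [Nat.testBit_xor]
  rcases lt_trichotomy j w with hj|hj|hj
  · rw [Nat.testBit_two_pow_add_gt hj, Nat.testBit_two_pow]
    simp [Nat.ne_of_lt' hj]
  · subst hj
    rw [Nat.testBit_two_pow_add_eq, Nat.testBit_two_pow]
    simp
  · have hp : (2:Nat)^(w+1) ≤ 2^j := Nat.pow_le_pow_right (by norm_num) hj
    have hp' := Nat.pow_succ 2 w
    rw [Nat.testBit_lt_two_pow (show 2^w+m < 2^j by omega),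
        Nat.testBit_lt_two_pow (show (2:Nat)^w < 2^j by omega),
        Nat.testBit_lt_two_pow (show m < 2^j by omega)]
    simp

lemma pvLow_cons_big (c : Char) (rest : List Char) (h : 30 ≤ rest.length) :
    pvLow (c :: rest) = pvLow rest := by
  unfold pvLow
  rw [List.length_cons, show rest.length + 1 - 30 = (rest.length - 30) + 1 from by omega,
      List.drop_succ_cons]

lemma pvLow_cons_small (c : Char) (rest : List Char) (h : rest.length < 30) :
    pvLow (c :: rest) = c :: rest := by
  unfold pvLow
  rw [List.length_cons, show rest.length + 1 - 30 = 0 from by omega, List.drop_zero]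

lemma pvLow_small (r : List Char) (h : r.length < 30) : pvLow r = r := by
  unfold pvLow; rw [show r.length - 30 = 0 from by omega, List.drop_zero]

lemma pvLoopA_eq (k n : Int) (r : List Char) : ∀ (i ans : Int), i + r.length = n →
    pvLoopA k n r i ans (pvVal (pvLow r)) =
      ans - (pvExps r).length + pvFA k (pvExps (pvLow r)) (pvVal (pvLow r)) := by
  induction r with
  | nil => intro i ans h; simp [pvLoopA, pvLow, pvExps, pvFA]
  | cons c rest ih =>
    intro i ans h
    have hlen : n - i - 1 = (rest.length : Int) := by
      rw [List.length_cons] at h; push_cast at h ⊢; omega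
    by_cases hc : c = '1'
    · by_cases hh : 30 ≤ rest.length
      · -- high '1': stripped for free, v untouched
        have hlow := pvLow_cons_big c rest hh
        rw [pvLoopA, if_pos hc, if_pos (by omega), hlow,
            ih (i+1) (ans-1) (by rw [List.length_cons] at h; push_cast at h ⊢; omega)]
        rw [pvExps, if_pos hc]
        simp only [List.singleton_append, List.length_cons]
        push_cast
        ring
      · replace hh : rest.length < 30 := by omega
        have hlow := pvLow_cons_small c rest hh
        have hlowr := pvLow_small rest hh
        have hval : pvVal (pvLow (c :: rest)) = 2 ^ rest.length + pvVal rest := by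
          rw [hlow, pvVal_cons, if_pos hc]
        have hexps : pvExps (pvLow (c :: rest)) = rest.length :: pvExps rest := by
          rw [hlow, pvExps, if_pos hc]; simp
        by_cases hk : pvVal (pvLow (c :: rest)) ≤ k
        · -- break: all remaining ones kept
          rw [pvLoopA, if_pos hc, if_neg (by omega),
              if_pos hk, hexps, pvFA, if_pos hk]
          rw [pvExps, if_pos hc]
          simp only [List.singleton_append, List.length_cons]
          push_cast
          ring
        · -- strip this one: v ^= 1 << rest.length
          have hxor : PySem.Int.bxor (pvVal (pvLow (c :: rest))) ((1 : Int) <<< (n - i - 1).toNat) = pvVal rest := by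
            rw [hval, show (n - i - 1).toNat = rest.length from by omega]
            exact pv_xor_step _ _ (pvVal_nonneg rest) (pvVal_lt rest)
          rw [pvLoopA, if_pos hc, if_neg (by omega), if_neg hk, hxor]
          have := ih (i+1) (ans-1) (by rw [List.length_cons] at h; push_cast at h ⊢; omega)
          rw [hlowr] at this
          rw [this, hexps, pvFA, if_neg hk, hval, pvExps, if_pos hc,
              show 2 ^ rest.length + pvVal rest - 2 ^ rest.length = pvVal rest from by ring]
          simp only [List.singleton_append, List.length_cons]
          push_cast
          ring
    · -- not a '1': nothing changes
      have hval : pvVal (pvLow (c :: rest)) = pvVal (pvLow rest) := by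
        by_cases hh : 30 ≤ rest.length
        · rw [pvLow_cons_big c rest hh]
        · replace hh : rest.length < 30 := by omega
          rw [pvLow_cons_small c rest hh, pvLow_small rest hh, pvVal_cons, if_neg hc]; ring
      have hexps : pvExps (pvLow (c :: rest)) = pvExps (pvLow rest) := by
        by_cases hh : 30 ≤ rest.length
        · rw [pvLow_cons_big c rest hh]
        · replace hh : rest.length < 30 := by omega
          rw [pvLow_cons_small c rest hh, pvLow_small rest hh, pvExps, if_neg hc]; simp
      rw [pvLoopA, if_neg hc, hval, hexps,
          ih (i+1) ans (by rw [List.length_cons] at h; push_cast at h ⊢; omega)]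
      rw [pvExps, if_neg hc]
      simp

lemma pvLoopB_eq (k : Int) (xs : List Char) : ∀ (o : Nat) (val cnt : Int),
    pvLoopB k (PySem.List.enumerate xs o) val cnt = cnt + pvGB k (pvEx o xs) val := by
  induction xs with
  | nil => intro o val cnt; simp [PySem.List.enumerate, pvLoopB, pvEx, pvGB]
  | cons c r ih =>
    intro o val cnt
    rw [PySem.List.enumerate_cons, pvLoopB]
    have hsh : (1 : Int) <<< ((o : Int)).toNat = 2 ^ o := by
      simp [Int.shiftLeft_eq]
    by_cases hc : c = '1'
    · have hex : pvEx o (c :: r) = o :: pvEx (o + 1) r := by rw [pvEx, if_pos hc]; simp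
      by_cases hk : val + 2 ^ o ≤ k
      · rw [if_pos ⟨hc, by rw [hsh]; exact hk⟩, hsh,
            show ((o : Int) + 1) = ((o + 1 : Nat) : Int) from by push_cast; ring, ih, hex,
            pvGB, if_pos hk]
        ring
      · rw [if_neg (by rw [hsh]; tauto),
            show ((o : Int) + 1) = ((o + 1 : Nat) : Int) from by push_cast; ring, ih, hex,
            pvGB, if_neg hk]
    · rw [if_neg (by tauto),
          show ((o : Int) + 1) = ((o + 1 : Nat) : Int) from by push_cast; ring, ih,
          show pvEx o (c :: r) = pvEx (o + 1) r from by rw [pvEx, if_neg hc]; simp]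

lemma pvEx_append (xs ys : List Char) : ∀ o : Nat,
    pvEx o (xs ++ ys) = pvEx o xs ++ pvEx (o + xs.length) ys := by
  induction xs with
  | nil => intro o; simp [pvEx]
  | cons c r ih =>
    intro o
    rw [List.cons_append, pvEx, pvEx, ih (o + 1), List.length_cons]
    simp only [List.append_assoc]
    rw [show o + (r.length + 1) = o + 1 + r.length from by omega]

lemma pvEx_rev (l : List Char) : ∀ o : Nat,
    pvEx o l.reverse = ((pvExps l).map (· + o)).reverse := by
  induction l with
  | nil => intro o; simp [pvEx, pvExps]
  | cons c r ih =>
    intro o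
    rw [List.reverse_cons, pvEx_append, ih o, pvExps, List.length_reverse]
    by_cases hc : c = '1'
    · simp [hc, pvEx, Nat.add_comm]
    · simp [hc, pvEx]

lemma pvEx_mem (xs : List Char) : ∀ o w, w ∈ pvEx o xs → o ≤ w := by
  induction xs with
  | nil => intro o w h; simp [pvEx] at h
  | cons c r ih =>
    intro o w h
    rw [pvEx] at h
    rcases List.mem_append.mp h with h1 | h2
    · split_ifs at h1 with hc
      · simp at h1; omega
      · simp at h1
    · have := ih (o + 1) w h2; omega

lemma pvEx_sorted (xs : List Char) : ∀ o, (pvEx o xs).Pairwise (· ≤ ·) := by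
  induction xs with
  | nil => intro o; simp [pvEx]
  | cons c r ih =>
    intro o
    rw [pvEx]
    split_ifs with hc
    · simp only [List.singleton_append, List.pairwise_cons]
      exact ⟨fun w hw => by have := pvEx_mem r (o + 1) w hw; omega, ih (o + 1)⟩
    · simpa using ih (o + 1)

lemma pvGB_zero (k : Int) (asc : List Nat) : ∀ val, (∀ w ∈ asc, k < val + 2 ^ w) →
    pvGB k asc val = 0 := by
  induction asc with
  | nil => intro val _; simp [pvGB]
  | cons w rest ih =>
    intro val h
    rw [pvGB, if_neg (by have := h w (by simp); omega)]
    exact ih val (fun w' hw' => h w' (by simp [hw']))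

lemma pvGB_eq_mp (k : Int) (asc : List Nat) (h : asc.Pairwise (· ≤ ·)) : ∀ val,
    pvGB k asc val = pvMP k asc val := by
  induction asc with
  | nil => intro val; simp [pvGB, pvMP]
  | cons w rest ih =>
    intro val
    rcases List.pairwise_cons.mp h with ⟨hall, hrest⟩
    by_cases hk : val + 2 ^ w ≤ k
    · rw [pvGB, pvMP, if_pos hk, if_pos hk, ih hrest]
    · rw [pvGB, pvMP, if_neg hk, if_neg hk]
      apply pvGB_zero
      intro w' hw'
      have h1 : (2:Int) ^ w ≤ 2 ^ w' := by
        apply pow_le_pow_right₀ (by norm_num) (hall w' hw')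
      omega

lemma pvMP_nonneg (k : Int) (xs : List Nat) : ∀ val, 0 ≤ pvMP k xs val := by
  induction xs with
  | nil => intro val; simp [pvMP]
  | cons w rest ih =>
    intro val
    rw [pvMP]
    split_ifs
    · have := ih (val + 2 ^ w); omega
    · omega

lemma pvMP_all (k : Int) (xs : List Nat) : ∀ val, val + pvSpow xs ≤ k →
    pvMP k xs val = xs.length := by
  induction xs with
  | nil => intro val _; simp [pvMP]
  | cons w rest ih =>
    intro val h
    rw [pvSpow_cons] at h
    have hs := pvSpow_nonneg rest
    rw [pvMP, if_pos (by omega), ih (val + 2 ^ w) (by omega)]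
    simp; ring

lemma pvMP_append (k : Int) (xs ys : List Nat) : ∀ val,
    pvMP k (xs ++ ys) val =
      if pvMP k xs val = (xs.length : Int) then (xs.length : Int) + pvMP k ys (val + pvSpow xs)
      else pvMP k xs val := by
  induction xs with
  | nil => intro val; simp [pvMP, pvSpow]
  | cons w xs' ih =>
    intro val
    rw [List.cons_append, pvMP, pvMP]
    by_cases hk : val + 2 ^ w ≤ k
    · rw [if_pos hk, if_pos hk, ih (val + 2 ^ w)]
      have hnn := pvMP_nonneg k xs' (val + 2 ^ w)
      by_cases hfull : pvMP k xs' (val + 2 ^ w) = (xs'.length : Int)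
      · rw [if_pos hfull, if_pos (by rw [hfull]; push_cast [List.length_cons]; ring),
            pvSpow_cons, show val + (2 ^ w + pvSpow xs') = val + 2 ^ w + pvSpow xs' from by ring]
        push_cast [List.length_cons]; ring
      · rw [if_neg hfull, if_neg (by push_cast [List.length_cons]; omega)]
    · rw [if_neg hk, if_neg hk, if_neg (by push_cast [List.length_cons]; omega)]

lemma pvFA_all (k : Int) (d : List Nat) (v : Int) (h : v ≤ k) : pvFA k d v = d.length := by
  cases d with
  | nil => simp [pvFA]
  | cons w rest => rw [pvFA, if_pos h]; simp; ring

lemma pv_core (k : Int) (d : List Nat) : pvFA k d (pvSpow d) = pvMP k d.reverse 0 := by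
  induction d with
  | nil => simp [pvFA, pvMP]
  | cons w rest ih =>
    have h2w : (0:Int) < 2 ^ w := by positivity
    have hsr : pvSpow rest.reverse = pvSpow rest := pvSpow_reverse rest
    rw [List.reverse_cons, pvMP_append, pvSpow_cons]
    by_cases hk : 2 ^ w + pvSpow rest ≤ k
    · rw [pvFA_all k _ _ hk,
          if_pos (by rw [pvMP_all k _ _ (by rw [hsr]; omega)]),
          List.length_reverse]
      rw [show (0:Int) + pvSpow rest.reverse = pvSpow rest from by rw [hsr]; ring]
      rw [pvMP, if_pos (by omega)]
      simp [pvMP]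
    · rw [pvFA, if_neg (by omega),
          show 2 ^ w + pvSpow rest - 2 ^ w = pvSpow rest from by ring, ih]
      by_cases hfull : pvMP k rest.reverse 0 = (rest.reverse.length : Int)
      · rw [if_pos hfull,
            show (0:Int) + pvSpow rest.reverse = pvSpow rest from by rw [hsr]; ring,
            pvMP, if_neg (by omega)]
        simp at hfull ⊢
        omega
      · rw [if_neg hfull]

lemma pvExps_append (xs ys : List Char) :
    pvExps (xs ++ ys) = (pvExps xs).map (· + ys.length) ++ pvExps ys := by
  induction xs with
  | nil => simp [pvExps]
  | cons c r ih =>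
    rw [List.cons_append, pvExps, pvExps, ih]
    by_cases hc : c = '1'
    · simp [hc, List.length_append]
    · simp [hc]

lemma pv_free_eq (l : List Char) : ∀ a : Int,
    l.foldl (fun a c => a + (if c ≠ '1' then 1 else 0)) a =
      a + (l.length : Int) - (pvExps l).length := by
  induction l with
  | nil => intro a; simp [pvExps]
  | cons c r ih =>
    intro a
    rw [List.foldl_cons, ih, pvExps]
    by_cases hc : c = '1'
    · simp [hc]; ring
    · simp [hc]; ring

lemma pv_first_loop (l : List Char) :
    (PySem.List.pyRange (max ((l.length : Int) - 30) 0) (l.length : Int)).foldl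
        (fun (v : Int) i => (v <<< (1 : Nat)) + (if PySem.List.pyGetD l i ' ' = '1' then 1 else 0)) 0 =
      pvVal (pvLow l) := by
  have hlen : ((l.length : Int)) = PySem.List.len l := by simp [PySem.List.len]
  rw [hlen, PySem.List.foldl_pyRange_pyGetD l ' '
      (fun (v : Int) c => (v <<< (1 : Nat)) + (if c = '1' then 1 else 0)) 0 (le_max_right _ _)]
  rw [show (max (PySem.List.len l - 30) 0).toNat = l.length - 30 from by
        simp [PySem.List.len]; omega]
  simp only [Int.shiftLeft_eq, pow_one]
  rw [pvLow, pvVal]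

lemma pvA_char (s : String) (k : Int) :
    longestSubsequence s k =
      (s.toList.length : Int) - (pvExps s.toList).length +
        pvFA k (pvExps (pvLow s.toList)) (pvVal (pvLow s.toList)) := by
  show pvLoopA k _ s.toList 0 _ _ = _
  rw [pv_first_loop, pvLoopA_eq k _ s.toList 0 _ (by ring)]

lemma pvB_char (s : String) (k : Int) :
    longestSubsequence_alt s k =
      (s.toList.length : Int) - (pvExps s.toList).length +
        pvMP k ((pvExps s.toList).reverse) 0 := by
  show s.toList.foldl _ 0 + pvLoopB k (PySem.List.enumerate s.toList.reverse) 0 0 = _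
  have h0 : PySem.List.enumerate s.toList.reverse = PySem.List.enumerate s.toList.reverse (((0:Nat) : Int)) := by norm_num
  rw [pv_free_eq, h0, pvLoopB_eq k s.toList.reverse 0 0 0,
      pvGB_eq_mp k _ (pvEx_sorted s.toList.reverse 0), pvEx_rev]
  simp

lemma pv_hi_len (l : List Char) (h : pvExps (l.take (l.length - 30)) ≠ []) :
    (pvLow l).length = 30 := by
  have h1 : l.take (l.length - 30) ≠ [] := by
    intro he; rw [he] at h; exact h rfl
  have h2 : l.length - 30 ≠ 0 := by
    intro he; rw [he] at h1; simp at h1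
  rw [pvLow, List.length_drop]; omega

lemma pv_split (l : List Char) :
    (pvExps l).reverse =
      (pvExps (pvLow l)).reverse ++
        ((pvExps (l.take (l.length - 30))).map (· + (pvLow l).length)).reverse := by
  conv_lhs => rw [show l = l.take (l.length - 30) ++ pvLow l from (List.take_append_drop _ l).symm]
  rw [pvExps_append, List.reverse_append]

lemma pvEx_findIdxs (xs : List Char) : ∀ o : Nat, xs.findIdxs (· = '1') o = pvEx o xs := by
  induction xs with
  | nil => intro o; simp [List.findIdxs, pvEx]
  | cons c r ih =>
    intro o
    rw [List.findIdxs_cons, pvEx]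
    by_cases hc : c = '1' <;> simp [hc, ih (o + 1)]

lemma pvExps_lt (r : List Char) : ∀ w ∈ pvExps r, w < r.length := by
  induction r with
  | nil => simp [pvExps]
  | cons c rest ih =>
    intro w hw
    rw [pvExps] at hw
    rcases List.mem_append.mp hw with h1 | h2
    · split_ifs at h1 with hc <;> simp at h1
      simp [h1]
    · have := ih w h2; simp; omega

lemma pvLow_len_le (l : List Char) : (pvLow l).length ≤ 30 := by
  rw [pvLow, List.length_drop]; omega

lemma pvD_shape (x : List Char) (k : Int) :
    (let es := x.reverse.findIdxs (· = '1')
     es.filter (30 ≤ ·) ≠ [] ∧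
     ((es.filter (· < 30)).map ((2 : Int) ^ ·)).sum + 2 ^ (es.filter (30 ≤ ·)).headD 0 ≤ k) ↔
    (pvExps (x.take (x.length - 30)) ≠ [] ∧
     pvSpow (pvExps (x.drop (x.length - 30))) +
        2 ^ ((pvExps (x.take (x.length - 30))).getLastD 0 + 30) ≤ k) := by
  dsimp only
  have hes : x.reverse.findIdxs (· = '1') = (pvExps x).reverse := by
    rw [pvEx_findIdxs, pvEx_rev]; simp
  have hlowmem : ∀ w ∈ (pvExps (pvLow x)).reverse, w < 30 := by
    intro w hw
    have := pvExps_lt (pvLow x) w (List.mem_reverse.mp hw)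
    have := pvLow_len_le x
    omega
  rcases List.eq_nil_or_concat (pvExps (x.take (x.length - 30))) with hE | ⟨E', e, hE⟩
  · have hsplit := pv_split x
    rw [hE] at hsplit
    simp only [List.map_nil, List.reverse_nil, List.append_nil] at hsplit
    rw [hes, hsplit]
    have : (pvExps (pvLow x)).reverse.filter (30 ≤ ·) = [] := by
      rw [List.filter_eq_nil_iff]
      intro w hw
      have := hlowmem w hw
      simpa using by omega
    rw [this, hE]
    simp
  · rw [List.concat_eq_append] at hE
    have hne : pvExps (x.take (x.length - 30)) ≠ [] := by rw [hE]; simp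
    have h30 := pv_hi_len x hne
    have hsplit := pv_split x
    rw [hE, h30] at hsplit
    rw [hes, hsplit, List.filter_append, List.filter_append]
    have hhighmem : ∀ w ∈ ((E' ++ [e]).map (· + 30)).reverse, 30 ≤ w := by
      intro w hw
      rcases List.mem_map.mp (List.mem_reverse.mp hw) with ⟨x, _, rfl⟩
      omega
    have hf1 : (pvExps (pvLow x)).reverse.filter (30 ≤ ·) = [] := by
      rw [List.filter_eq_nil_iff]; intro w hw; have := hlowmem w hw; simpa using by omega
    have hf2 : ((E' ++ [e]).map (· + 30)).reverse.filter (30 ≤ ·) = ((E' ++ [e]).map (· + 30)).reverse := by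
      rw [List.filter_eq_self]; intro w hw; simpa using hhighmem w hw
    have hf3 : (pvExps (pvLow x)).reverse.filter (· < 30) = (pvExps (pvLow x)).reverse := by
      rw [List.filter_eq_self]; intro w hw; simpa using hlowmem w hw
    have hf4 : ((E' ++ [e]).map (· + 30)).reverse.filter (· < 30) = [] := by
      rw [List.filter_eq_nil_iff]; intro w hw; have := hhighmem w hw; simpa using by omega
    rw [hf1, hf2, hf3, hf4, List.nil_append, List.append_nil, hE]
    have hrev : ((E' ++ [e]).map (· + 30)).reverse = (e + 30) :: (E'.map (· + 30)).reverse := by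
      rw [List.map_append]; simp
    rw [hrev, List.getLastD_concat]
    simp only [List.headD_cons, ne_eq, reduceCtorEq, not_false_eq_true, true_and]
    constructor
    · rintro h
      refine ⟨by simp, ?_⟩
      rw [show pvSpow (pvExps (x.drop (x.length - 30))) =
            (((pvExps (pvLow x)).reverse.map ((2 : Int) ^ ·)).sum) from by
          rw [show x.drop (x.length - 30) = pvLow x from rfl,
              ← pvSpow_reverse]; rfl]
      exact h
    · rintro ⟨-, h⟩
      rw [show pvSpow (pvExps (x.drop (x.length - 30))) =
            (((pvExps (pvLow x)).reverse.map ((2 : Int) ^ ·)).sum) from by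
          rw [show x.drop (x.length - 30) = pvLow x from rfl,
              ← pvSpow_reverse]; rfl] at h
      exact h


lemma pvP_last_ge (X : List Nat) (m d : Nat) (hX : X ≠ []) :
    m ≤ (X.map (· + m)).getLastD d := by
  rcases List.eq_nil_or_concat X with rfl | ⟨X', x, rfl⟩
  · exact absurd rfl hX
  · rw [List.concat_eq_append, List.map_append]
    simp

lemma pvD_iff (s : String) (k : Int) (hk : k ≤ 2147483648) :
    D_longestSubsequence s k ↔ pvDold s k := by
  unfold D_longestSubsequence pvDold
  rw [pvD_shape]
  have hdd : (s.toList.drop (s.toList.length - 32)).drop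
      ((s.toList.drop (s.toList.length - 32)).length - 30) =
      s.toList.drop (s.toList.length - 30) := by
    rw [List.drop_drop, List.length_drop]
    congr 1
    omega
  have hta : s.toList.take (s.toList.length - 30) =
      s.toList.take (s.toList.length - 32) ++
        (s.toList.drop (s.toList.length - 32)).take
          ((s.toList.drop (s.toList.length - 32)).length - 30) := by
    rw [← List.take_add]
    congr 1
    rw [List.length_drop]
    omega
  rw [hdd, hta, pvExps_append]
  rcases List.eq_nil_or_concat
      (pvExps ((s.toList.drop (s.toList.length - 32)).take
        ((s.toList.drop (s.toList.length - 32)).length - 30))) with hG | ⟨G', g, hG⟩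
  all_goals (try rw [List.concat_eq_append] at hG)
  · rw [hG, List.append_nil]
    constructor
    · rintro ⟨h1, -⟩; exact (h1 rfl).elim
    · rintro ⟨hP, hfit⟩
      exfalso
      -- the lowest '1' of weight ≥ 2^30 has weight ≥ 2^32, which can never fit under k ≤ 2^31
      have hXne : pvExps (s.toList.take (s.toList.length - 32)) ≠ [] := by
        intro hx
        rw [hx] at hP
        exact hP rfl
      have htne : s.toList.take (s.toList.length - 32) ≠ [] := by
        intro hx
        rw [hx] at hXne
        exact hXne rfl
      have hn : 33 ≤ s.toList.length := by
        rcases Nat.lt_or_ge s.toList.length 33 with h | h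
        · exfalso
          apply htne
          rw [List.take_eq_nil_iff]
          by_cases hz : s.toList.length - 32 = 0
          · left; exact hz
          · right
            exfalso
            omega
        · exact h
      have hW : ((s.toList.drop (s.toList.length - 32)).take
          ((s.toList.drop (s.toList.length - 32)).length - 30)).length = 2 := by
        rw [List.length_take, List.length_drop]
        omega
      have hge := pvP_last_ge (pvExps (s.toList.take (s.toList.length - 32)))
        ((s.toList.drop (s.toList.length - 32)).take
          ((s.toList.drop (s.toList.length - 32)).length - 30)).length 0 hXne
      rw [hW] at hge
      set e := ((pvExps (s.toList.take (s.toList.length - 32))).map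
        (· + ((s.toList.drop (s.toList.length - 32)).take
          ((s.toList.drop (s.toList.length - 32)).length - 30)).length)).getLastD 0 with he
      rw [hW] at he
      have hpow : (2:Int) ^ 32 ≤ 2 ^ (e + 30) := by
        apply pow_le_pow_right₀ (by norm_num)
        omega
      have hsp := pvSpow_nonneg (pvExps (s.toList.drop (s.toList.length - 30)))
      have : (2:Int) ^ 32 = 4294967296 := by norm_num
      omega
  · rw [hG]
    rw [show (pvExps (s.toList.take (s.toList.length - 32))).map
          (· + ((s.toList.drop (s.toList.length - 32)).take
            ((s.toList.drop (s.toList.length - 32)).length - 30)).length) ++ (G' ++ [g]) =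
        ((pvExps (s.toList.take (s.toList.length - 32))).map
          (· + ((s.toList.drop (s.toList.length - 32)).take
            ((s.toList.drop (s.toList.length - 32)).length - 30)).length) ++ G') ++ [g] from by
      rw [List.append_assoc]]
    rw [List.getLastD_concat, List.getLastD_concat]
    simp

theorem pv_unchanged (s : String) (k : Int) (hnd : ¬ pvDold s k) :
    longestSubsequence s k = longestSubsequence_alt s k := by
  rw [pvA_char, pvB_char]
  congr 1
  rw [pvVal_eq_spow, pv_core]
  conv_rhs => rw [pv_split]
  rcases List.eq_nil_or_concat (pvExps (s.toList.take (s.toList.length - 30))) with hE | ⟨E', e, hE⟩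
  all_goals (try rw [List.concat_eq_append] at hE)
  · rw [hE]; simp
  · have hne : pvExps (s.toList.take (s.toList.length - 30)) ≠ [] := by
      rw [hE]; simp
    have hfit : k < pvSpow (pvExps (s.toList.drop (s.toList.length - 30))) +
        2 ^ ((pvExps (s.toList.take (s.toList.length - 30))).getLastD 0 + 30) := by
      by_contra hx
      exact hnd ⟨hne, by omega⟩
    have h30 := pv_hi_len s.toList hne
    rw [hE, List.getLastD_concat] at hfit
    rw [hE, h30, List.map_append, List.reverse_append, pvMP_append]
    simp only [List.map_cons, List.map_nil, List.reverse_singleton, List.singleton_append]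
    have hval : pvSpow (pvExps (s.toList.drop (s.toList.length - 30))) =
        pvSpow ((pvExps (pvLow s.toList)).reverse) := by
      rw [pvSpow_reverse, pvLow]
    split_ifs with hfull
    · rw [pvMP, if_neg (by rw [zero_add, ← hval]; omega), hfull]; ring
    · rfl

theorem pv_tight (s : String) (k : Int) (hd : pvDold s k) :
    longestSubsequence s k ≠ longestSubsequence_alt s k := by
  obtain ⟨hne, hfit⟩ := hd
  have h30 := pv_hi_len s.toList hne
  rcases List.eq_nil_or_concat (pvExps (s.toList.take (s.toList.length - 30))) with hE | ⟨E', e, hE⟩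
  · exact absurd hE hne
  rw [List.concat_eq_append] at hE
  rw [hE, List.getLastD_concat] at hfit
  have hval : pvVal (pvLow s.toList) = pvSpow (pvExps (pvLow s.toList)) := by
    rw [pvVal_eq_spow]
  rw [show s.toList.drop (s.toList.length - 30) = pvLow s.toList from rfl] at hfit
  have h2e : (0:Int) < 2 ^ (e + 30) := by positivity
  have hA : longestSubsequence s k =
      (s.toList.length : Int) - (pvExps s.toList).length +
        ((pvExps (pvLow s.toList)).length : Int) := by
    rw [pvA_char, pvFA_all k _ _ (by omega)]
  have hmpLw : pvMP k ((pvExps (pvLow s.toList)).reverse) 0 =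
      ((pvExps (pvLow s.toList)).length : Int) := by
    rw [pvMP_all k _ 0 (by rw [pvSpow_reverse, ← hval]; omega), List.length_reverse]
  have hB : longestSubsequence_alt s k =
      (s.toList.length : Int) - (pvExps s.toList).length +
        (((pvExps (pvLow s.toList)).length : Int) +
          pvMP k ((e + 30) :: (E'.map (· + 30)).reverse) (pvSpow (pvExps (pvLow s.toList)))) := by
    rw [pvB_char, pv_split, hE, h30, List.map_append, List.reverse_append, pvMP_append]
    simp only [List.map_cons, List.map_nil, List.reverse_singleton, List.singleton_append]
    rw [if_pos (by rw [hmpLw, List.length_reverse]),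
        show (0:Int) + pvSpow ((pvExps (pvLow s.toList)).reverse) = pvSpow (pvExps (pvLow s.toList)) from by
          rw [pvSpow_reverse]; ring,
        List.length_reverse]
  have hpos : 0 < pvMP k ((e + 30) :: (E'.map (· + 30)).reverse) (pvSpow (pvExps (pvLow s.toList))) := by
    rw [pvMP, if_pos (by omega)]
    have := pvMP_nonneg k ((E'.map (· + 30)).reverse) (pvSpow (pvExps (pvLow s.toList)) + 2 ^ (e + 30))
    omega
  rw [hA, hB]
  omega

-- ===== VERDICT =====
theorem longestSubsequence_spec : Claim_unchanged_longestSubsequence := by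
  intro s k hdom hnd
  have hk : k ≤ 2147483648 := by
    have h2 := (Bool.and_eq_true _ _).mp hdom |>.2
    simp only [pvDomInt, decide_eq_true_eq] at h2
    exact h2.2
  exact pv_unchanged s k (fun h => hnd ((pvD_iff s k hk).mpr h))

theorem longestSubsequence_changed : Claim_changed_longestSubsequence := by
  unfold Claim_changed_longestSubsequence; decide

theorem longestSubsequence_tight : Claim_exact_longestSubsequence := by
  intro s k hdom hd
  have hk : k ≤ 2147483648 := by
    have h2 := (Bool.and_eq_true _ _).mp hdom |>.2
    simp only [pvDomInt, decide_eq_true_eq] at h2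
    exact h2.2
  exact pv_tight s k ((pvD_iff s k hk).mp hd)
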